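-- pv_equiv track=rewrite | github.com/MahmoudAljamal92/quran-qsf | app/quran_match.py | _verse_index_at
-- ===== SOURCE A (Python) =====
-- def _verse_index_at(offset: int, verse_starts: list[int]) -> int:
--     """Binary-search the verse index whose normalised text contains `offset`."""
--     lo, hi = 0, len(verse_starts) - 2
--     while lo <= hi:
--         mid = (lo + hi) // 2
--         if verse_starts[mid] <= offset < verse_starts[mid + 1]:
--             return mid
--         if offset < verse_starts[mid]:
--             hi = mid - 1
--         else:
--             lo = mid + 1
--     return max(0, min(len(verse_starts) - 2, lo))
-- ===== SOURCE B (Python) =====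
-- def _verse_index_at(offset: int, verse_starts: list[int]) -> int:
--     """Linear scan: first i with verse_starts[i] <= offset < verse_starts[i+1]; clamp otherwise."""
--     n = len(verse_starts)
--     for i in range(n - 1):
--         if verse_starts[i] <= offset < verse_starts[i + 1]:
--             return i
--     if n < 2 or offset < verse_starts[0]:
--         return 0
--     return n - 2
-- ===== Notes on version B (the rewrite author's own statement) =====
-- stated objective: simpler
-- what changed: Replaces the binary search over [lo,hi] with a single left-to-right scan returning the first bracketing interval, with the same clamp (0 below/short, len-2 above) as fallback.
-- outside the precondition, e.g. on _verse_index_at(2, [3, 0, 1, -3]): A returns 2, B returns 0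
import Mathlib
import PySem

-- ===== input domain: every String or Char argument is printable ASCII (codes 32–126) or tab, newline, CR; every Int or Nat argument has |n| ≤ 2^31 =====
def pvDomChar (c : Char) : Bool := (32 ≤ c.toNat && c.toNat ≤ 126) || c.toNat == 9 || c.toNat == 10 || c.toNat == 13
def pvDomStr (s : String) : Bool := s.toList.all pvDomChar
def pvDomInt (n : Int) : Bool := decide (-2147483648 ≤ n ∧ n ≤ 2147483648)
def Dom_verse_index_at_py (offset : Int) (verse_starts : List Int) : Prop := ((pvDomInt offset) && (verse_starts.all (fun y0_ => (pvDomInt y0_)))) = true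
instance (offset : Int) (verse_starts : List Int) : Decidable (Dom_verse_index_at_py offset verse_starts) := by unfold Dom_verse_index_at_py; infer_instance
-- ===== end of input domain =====

-- B replaces the binary search by a single left-to-right scan for the first bracketing
-- interval (simpler); equivalence is proved on sorted (non-decreasing) verse_starts.

-- ===== PORT A =====
-- the while-loop of A; indices mid / mid+1 are always in range when the loop runs
-- (0 ≤ lo ≤ mid ≤ hi ≤ len-2), so pyGetD's default is unreachable
def pvBsLoop (offset : Int) (vs : List Int) (lo hi : Int) : Int :=
  if _h : lo ≤ hi then
    let mid := PySem.Int.floordiv (lo + hi) 2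
    if PySem.List.pyGetD vs mid 0 ≤ offset ∧ offset < PySem.List.pyGetD vs (mid + 1) 0 then
      mid
    else if offset < PySem.List.pyGetD vs mid 0 then
      pvBsLoop offset vs lo (mid - 1)
    else
      pvBsLoop offset vs (mid + 1) hi
  else
    max 0 (min ((vs.length : Int) - 2) lo)
termination_by (hi + 1 - lo).toNat
decreasing_by
  · have := PySem.Int.floordiv_two_mid_bounds _h
    omega
  · have := PySem.Int.floordiv_two_mid_bounds _h
    omega

def verse_index_at_py (offset : Int) (verse_starts : List Int) : Int :=
  pvBsLoop offset verse_starts 0 ((verse_starts.length : Int) - 2)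

-- ===== PORT B =====
-- the for-loop of B: first i in range(n-1) with vs[i] <= offset < vs[i+1]
def pvScan (offset : Int) (vs : List Int) (i : Nat) : Option Nat :=
  if h : i + 1 < vs.length then
    if vs[i] ≤ offset ∧ offset < vs[i + 1] then some i
    else pvScan offset vs (i + 1)
  else none
termination_by vs.length - i

def verse_index_at_py_alt (offset : Int) (verse_starts : List Int) : Int :=
  match pvScan offset verse_starts 0 with
  | some i => (i : Int)
  | none =>
      if verse_starts.length < 2 then 0
      else if offset < verse_starts.headD 0 then 0
      else (verse_starts.length : Int) - 2

-- ===== PRECONDITION & SPEC =====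
-- Pre_ excludes verse_starts of length ≥ 3 that are not sorted non-decreasingly: A's binary
-- search assumes a sorted list and its answer on unsorted input is an accident of the probe
-- order (lists of length ≤ 2 are admitted unconditionally: both sides degenerate there).
def Pre_verse_index_at_py (offset : Int) (verse_starts : List Int) : Prop :=
  verse_starts.length ≤ 2 ∨ List.Pairwise (· ≤ ·) verse_starts
instance (offset : Int) (verse_starts : List Int) : Decidable (Pre_verse_index_at_py offset verse_starts) := by unfold Pre_verse_index_at_py; infer_instance

def pvWitness_verse_index_at_py : Int × List Int := (5, [0, 3, 7, 10])

def Spec_verse_index_at_py (offset : Int) (verse_starts : List Int) (out : Int) : Prop := out = verse_index_at_py_alt offset verse_starts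
instance (offset : Int) (verse_starts : List Int) (out : Int) : Decidable (Spec_verse_index_at_py offset verse_starts out) := by unfold Spec_verse_index_at_py; infer_instance

-- ===== CLAIM (what is proved, stated in full; the proofs are below) =====
def Claim_equal_verse_index_at_py : Prop := ∀ (offset : Int) (verse_starts : List Int), Dom_verse_index_at_py offset verse_starts → Pre_verse_index_at_py offset verse_starts → Spec_verse_index_at_py offset verse_starts (verse_index_at_py offset verse_starts)

-- ===== LEMMAS AND PROOFS =====

-- monotonicity of a sorted list
theorem pv_sorted_le {vs : List Int} (hs : List.Pairwise (· ≤ ·) vs)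
    {i j : Nat} (hij : i ≤ j) (hj : j < vs.length) : vs[i] ≤ vs[j] := by
  rcases Nat.lt_or_eq_of_le hij with h | h
  · exact List.pairwise_iff_getElem.mp hs i j (by omega) hj h
  · subst h; exact le_refl _

-- at most one bracketing index in a sorted list
theorem pv_uniq {vs : List Int} (hs : List.Pairwise (· ≤ ·) vs) {offset : Int}
    {i j : Nat} (hi : i + 1 < vs.length) (hj : j + 1 < vs.length)
    (hPi : vs[i] ≤ offset ∧ offset < vs[i + 1])
    (hPj : vs[j] ≤ offset ∧ offset < vs[j + 1]) : i = j := by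
  by_contra hne
  rcases Nat.lt_or_ge i j with h | h
  · have : vs[i + 1] ≤ vs[j] := pv_sorted_le hs (by omega) (by omega)
    omega
  · have hj' : j < i := by omega
    have : vs[j + 1] ≤ vs[i] := pv_sorted_le hs (by omega) (by omega)
    omega

theorem pv_getD_int {vs : List Int} {m : Int} (h0 : 0 ≤ m) (h : m < (vs.length : Int)) :
    PySem.List.pyGetD vs m 0 = vs[m.toNat]'(by omega) :=
  PySem.List.pyGetD_eq_getElem vs 0 h0 h

-- the binary search returns the bracketing index when one lies in [lo, hi]
theorem pv_bs_finds (offset : Int) (vs : List Int) (hs : List.Pairwise (· ≤ ·) vs)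
    (k : Nat) (hk : k + 1 < vs.length)
    (hP : vs[k] ≤ offset ∧ offset < vs[k + 1]) :
    ∀ (lo hi : Int), 0 ≤ lo → lo ≤ (k : Int) → (k : Int) ≤ hi → hi ≤ (vs.length : Int) - 2 →
      pvBsLoop offset vs lo hi = (k : Int) := by
  intro lo hi hlo0 hlok hkhi hhi
  have hle : lo ≤ hi := by omega
  have hmid := PySem.Int.floordiv_two_mid_bounds hle
  rw [pvBsLoop]
  simp only [dif_pos hle]
  set mid := PySem.Int.floordiv (lo + hi) 2 with hmiddef
  have hm0 : 0 ≤ mid := by omega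
  have hm1 : mid < (vs.length : Int) := by omega
  have hm2 : mid + 1 < (vs.length : Int) := by omega
  rw [pv_getD_int hm0 hm1, pv_getD_int (by omega) hm2]
  have hmt1 : (mid + 1).toNat = mid.toNat + 1 := by omega
  by_cases hPm : vs[mid.toNat]'(by omega) ≤ offset ∧ offset < vs[(mid + 1).toNat]'(by omega)
  · rw [if_pos hPm]
    have : mid.toNat = k := by
      apply pv_uniq hs (by omega) hk _ hP
      constructor
      · exact hPm.1
      · have := hPm.2
        simp only [hmt1] at this
        exact this
    omega
  · rw [if_neg hPm]
    by_cases hlt : offset < vs[mid.toNat]'(by omega)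
    · rw [if_pos hlt]
      -- k < mid: otherwise vs[mid] ≤ vs[k] ≤ offset
      have hkm : (k : Int) < mid := by
        by_contra hc
        have hmk : mid.toNat ≤ k := by omega
        have := pv_sorted_le hs hmk (by omega)
        omega
      exact pv_bs_finds offset vs hs k hk hP lo (mid - 1) hlo0 hlok (by omega) (by omega)
    · rw [if_neg hlt]
      -- offset ≥ vs[mid+1], so mid < k
      have hge : vs[(mid + 1).toNat]'(by omega) ≤ offset := by
        rcases not_and_or.mp hPm with h | h
        · omega
        · omega
      have hmk : mid < (k : Int) := by
        by_contra hc
        have h1 : k + 1 ≤ (mid + 1).toNat := by omega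
        have := pv_sorted_le hs h1 (by omega)
        omega
      exact pv_bs_finds offset vs hs k hk hP (mid + 1) hi (by omega) (by omega) hkhi hhi
termination_by lo hi => (hi + 1 - lo).toNat
decreasing_by
  · omega
  · omega

-- when offset is below vs[0], the loop always moves hi and falls through to the clamp = 0
theorem pv_bs_below (offset : Int) (vs : List Int) (hs : List.Pairwise (· ≤ ·) vs)
    (hne : 0 < vs.length) (hoff : offset < vs[0]) :
    ∀ (hi : Int), hi ≤ (vs.length : Int) - 2 → pvBsLoop offset vs 0 hi = 0 := by
  intro hi hhi
  rw [pvBsLoop]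
  by_cases hle : (0 : Int) ≤ hi
  · simp only [dif_pos hle]
    have hmid := PySem.Int.floordiv_two_mid_bounds hle
    set mid := PySem.Int.floordiv (0 + hi) 2 with hmiddef
    have hm1 : mid < (vs.length : Int) := by omega
    rw [pv_getD_int (by omega) hm1]
    have hmono : vs[0] ≤ vs[mid.toNat]'(by omega) := pv_sorted_le hs (by omega) (by omega)
    rw [if_neg (by omega), if_pos (by omega)]
    exact pv_bs_below offset vs hs hne hoff (mid - 1) (by omega)
  · simp only [dif_neg hle]
    omega
termination_by hi => (hi + 1).toNat
decreasing_by omega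

-- when offset is at or above the last start, the loop always moves lo and clamps to len-2
theorem pv_bs_above (offset : Int) (vs : List Int) (hs : List.Pairwise (· ≤ ·) vs)
    (hn : 2 ≤ vs.length) (hoff : vs[vs.length - 1] ≤ offset) :
    ∀ (lo : Int), 0 ≤ lo → lo ≤ (vs.length : Int) - 1 →
      pvBsLoop offset vs lo ((vs.length : Int) - 2) = (vs.length : Int) - 2 := by
  intro lo hlo0 hlo
  rw [pvBsLoop]
  by_cases hle : lo ≤ (vs.length : Int) - 2
  · simp only [dif_pos hle]
    have hmid := PySem.Int.floordiv_two_mid_bounds hle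
    set mid := PySem.Int.floordiv (lo + ((vs.length : Int) - 2)) 2 with hmiddef
    have hm1 : mid < (vs.length : Int) := by omega
    have hm2 : mid + 1 < (vs.length : Int) := by omega
    rw [pv_getD_int (by omega) hm1, pv_getD_int (by omega) hm2]
    have hmono1 : vs[mid.toNat]'(by omega) ≤ vs[vs.length - 1] :=
      pv_sorted_le hs (by omega) (by omega)
    have hmono2 : vs[(mid + 1).toNat]'(by omega) ≤ vs[vs.length - 1] :=
      pv_sorted_le hs (by omega) (by omega)
    rw [if_neg (by omega), if_neg (by omega)]
    exact pv_bs_above offset vs hs hn hoff (mid + 1) (by omega) (by omega)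
  · simp only [dif_neg hle]
    omega
termination_by lo => ((vs.length : Int) - lo).toNat
decreasing_by omega

-- a sorted list with vs[0] ≤ offset < vs[n-1] has a bracketing index
theorem pv_cross (offset : Int) (vs : List Int)
    (hn : 2 ≤ vs.length) (h0 : vs[0] ≤ offset) (h1 : offset < vs[vs.length - 1]) :
    ∃ k, ∃ hk : k + 1 < vs.length, vs[k] ≤ offset ∧ offset < vs[k + 1] := by
  by_contra hc
  push Not at hc
  have hall : ∀ i, (hi : i < vs.length) → vs[i] ≤ offset := by
    intro i
    induction i with
    | zero => intro _; exact h0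
    | succ j ih =>
      intro hi
      have hle := ih (by omega)
      have := hc j (by omega)
      omega
  have := hall (vs.length - 1) (by omega)
  omega

-- the linear scan finds the bracketing index
theorem pv_scan_some (offset : Int) (vs : List Int) (hs : List.Pairwise (· ≤ ·) vs)
    (k : Nat) (hk : k + 1 < vs.length)
    (hP : vs[k] ≤ offset ∧ offset < vs[k + 1]) :
    ∀ i, i ≤ k → pvScan offset vs i = some k := by
  intro i hik
  rw [pvScan]
  have hi1 : i + 1 < vs.length := by omega
  simp only [dif_pos hi1]
  by_cases hPi : vs[i] ≤ offset ∧ offset < vs[i + 1]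
  · rw [if_pos hPi]
    exact congrArg some (pv_uniq hs hi1 hk hPi hP)
  · rw [if_neg hPi]
    have hik' : i < k := by
      rcases Nat.lt_or_eq_of_le hik with h | h
      · exact h
      · exact absurd (h ▸ hP) hPi
    exact pv_scan_some offset vs hs k hk hP (i + 1) hik'
termination_by i => vs.length - i
decreasing_by omega

-- the linear scan returns none when no bracketing index exists
theorem pv_scan_none (offset : Int) (vs : List Int)
    (hc : ∀ k, (hk : k + 1 < vs.length) → ¬ (vs[k] ≤ offset ∧ offset < vs[k + 1])) :
    ∀ i, pvScan offset vs i = none := by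
  intro i
  rw [pvScan]
  by_cases hi1 : i + 1 < vs.length
  · simp only [dif_pos hi1]
    rw [if_neg (hc i hi1)]
    exact pv_scan_none offset vs hc (i + 1)
  · simp only [dif_neg hi1]
termination_by i => vs.length - i
decreasing_by omega

theorem pv_headD_eq {vs : List Int} (h : 0 < vs.length) : vs.headD 0 = vs[0] := by
  cases vs with
  | nil => simp at h
  | cons a t => rfl

-- with exactly two starts there is a single candidate interval: both sides return 0
theorem pv_two (offset a b : Int) :
    verse_index_at_py offset [a, b] = verse_index_at_py_alt offset [a, b] := by
  have hfd : PySem.Int.floordiv (0 + 0) 2 = 0 := by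
    rw [PySem.Int.floordiv_eq_ediv_of_pos (by omega)]; norm_num
  unfold verse_index_at_py verse_index_at_py_alt
  rw [pvBsLoop, pvScan]
  simp only [List.length_cons, List.length_nil]
  norm_num [hfd]
  rw [show PySem.List.pyGetD [a, b] (1 : Int) 0 = b from rfl]
  by_cases h1 : a ≤ offset ∧ offset < b
  · rw [if_pos h1, if_pos h1]
    rfl
  · rw [if_neg h1, if_neg h1]
    rw [pvScan]
    norm_num
    by_cases h2 : offset < a
    · rw [if_pos h2, pvBsLoop]
      norm_num
    · rw [if_neg h2, pvBsLoop]
      norm_num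

-- ===== VERDICT (by name: the statement is the Claim_ definition above) =====
theorem verse_index_at_py_spec : Claim_equal_verse_index_at_py := by
  intro offset vs _hdom hpre
  by_cases h2 : vs.length = 2
  · match vs, h2 with
    | [a, b], _ => exact pv_two offset a b
  unfold Spec_verse_index_at_py verse_index_at_py verse_index_at_py_alt
  by_cases hn : vs.length < 2
  · -- degenerate: loop never runs, scan finds nothing, both return 0
    rw [pvBsLoop]
    rw [dif_neg (by omega)]
    rw [pv_scan_none offset vs (fun k hk => absurd hk (by omega)) 0]
    show max 0 (min ((vs.length : Int) - 2) 0) =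
      if vs.length < 2 then 0 else if offset < vs.headD 0 then 0 else (vs.length : Int) - 2
    rw [if_pos hn]
    omega
  · push Not at hn
    have hs : List.Pairwise (· ≤ ·) vs := by
      rcases hpre with h | h
      · omega
      · exact h
    by_cases hex : ∃ k, ∃ hk : k + 1 < vs.length, vs[k] ≤ offset ∧ offset < vs[k + 1]
    · obtain ⟨k, hk, hP⟩ := hex
      rw [pv_bs_finds offset vs hs k hk hP 0 ((vs.length : Int) - 2)
            (by omega) (by omega) (by omega) (by omega)]
      rw [pv_scan_some offset vs hs k hk hP 0 (by omega)]
    · have hno : ∀ k, (hk : k + 1 < vs.length) → ¬ (vs[k] ≤ offset ∧ offset < vs[k + 1]) :=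
        fun k hk hP => hex ⟨k, hk, hP⟩
      rw [pv_scan_none offset vs hno 0]
      rw [if_neg (by omega)]
      rw [pv_headD_eq (by omega)]
      by_cases hbelow : offset < vs[0]
      · rw [if_pos hbelow]
        exact pv_bs_below offset vs hs (by omega) hbelow _ (by omega)
      · rw [if_neg hbelow]
        have habove : vs[vs.length - 1] ≤ offset := by
          by_contra hc
          push Not at hc
          obtain ⟨k, hk, hP⟩ := pv_cross offset vs hn (by omega) hc
          exact hno k hk hP
        exact pv_bs_above offset vs hs hn habove 0 (by omega) (by omega)
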